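-- pv_equiv track=rewrite | github.com/Sleepyreaper/agent-nextgen | src/agents/belle_document_analyzer.py | _extract_application_data
-- ===== SOURCE A (Python) =====
-- from typing import Dict, List, Any, Optional, Tuple
--
-- def _extract_application_data(text: str) -> Dict[str, Any]:
--     """Extract application form data."""
--     data = {}
--
--     # Look for key fields
--     fields = {
--         "motivation": ["motivation", "why", "interest"],
--         "experience": ["experience", "background", "history"],
--         "goals": ["goals", "objectives", "future plans"],
--         "achievements": ["achievement", "accomplishment", "award"]
--     }
--
--     sentences = text.split('.')
--     for field_name, keywords in fields.items():
--         for sent in sentences: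
--             if any(kw in sent.lower() for kw in keywords) and len(sent.strip()) > 30:
--                 data[field_name] = sent.strip()
--                 break
--
--     return data
-- ===== SOURCE B (Python) =====
-- def _extract_application_data(text: str):
--     """Extract application form data (single pass over sentences)."""
--     motivation = experience = goals = achievements = None
--     for sent in text.split('.'):
--         if motivation is not None and experience is not None and goals is not None and achievements is not None:
--             break
--         stripped = sent.strip()
--         if len(stripped) <= 30:
--             continue
--         low = sent.lower()
--         if motivation is None and ("motivation" in low or "why" in low or "interest" in low):
--             motivation = stripped
--         if experience is None and ("experience" in low or "background" in low or "history" in low):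
--             experience = stripped
--         if goals is None and ("goals" in low or "objectives" in low or "future plans" in low):
--             goals = stripped
--         if achievements is None and ("achievement" in low or "accomplishment" in low or "award" in low):
--             achievements = stripped
--     data = {}
--     if motivation is not None:
--         data["motivation"] = motivation
--     if experience is not None:
--         data["experience"] = experience
--     if goals is not None:
--         data["goals"] = goals
--     if achievements is not None:
--         data["achievements"] = achievements
--     return data
-- ===== Notes on version B (the rewrite author's own statement) =====
-- stated objective: faster
-- what changed: B makes a single pass over the sentences, filling four still-empty slots and stopping once all are filled, instead of A's rescan of the whole sentence list for each of the four fields.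
import Mathlib
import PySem

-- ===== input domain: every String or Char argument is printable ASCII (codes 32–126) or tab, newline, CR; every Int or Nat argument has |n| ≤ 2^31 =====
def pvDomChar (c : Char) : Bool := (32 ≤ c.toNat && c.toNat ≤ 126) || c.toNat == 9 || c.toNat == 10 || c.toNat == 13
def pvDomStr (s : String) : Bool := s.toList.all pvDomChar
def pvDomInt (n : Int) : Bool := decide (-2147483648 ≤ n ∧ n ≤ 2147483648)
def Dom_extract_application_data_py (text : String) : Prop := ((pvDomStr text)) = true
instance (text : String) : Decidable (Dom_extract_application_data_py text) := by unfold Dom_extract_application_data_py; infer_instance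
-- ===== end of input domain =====

-- B replaces A's per-field rescan of the whole sentence list by one pass over the sentences with early exit (objective: faster, constant factor).

-- ===== PORT A =====
def aFields : List (String × List String) :=
  [("motivation", ["motivation", "why", "interest"]),
   ("experience", ["experience", "background", "history"]),
   ("goals", ["goals", "objectives", "future plans"]),
   ("achievements", ["achievement", "accomplishment", "award"])]

-- inner 'for sent in sentences: … break' loop of A
def aLoop (sentences : List String) (keywords : List String) : Option String :=
  match sentences with
  | [] => none
  | sent :: rest =>
      if (keywords.any fun kw => PySem.Str.isIn kw (PySem.Str.lower sent))
          && 30 < PySem.Str.len (PySem.Str.strip sent) then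
        some (PySem.Str.strip sent)
      else aLoop rest keywords

def extract_application_data_py (text : String) : List (String × String) :=
  let sentences := (PySem.Str.split? text ".").getD []
  (aFields.foldl (fun (data : PySem.Dict String String) fk =>
      match aLoop sentences fk.2 with
      | some v => data.insert fk.1 v
      | none => data) PySem.Dict.empty).items

-- ===== PORT B =====
-- single pass over sentences, four optional slots, early break when all filled
def bLoop (sents : List String) (m e g a : Option String) :
    Option String × Option String × Option String × Option String :=
  match sents with
  | [] => (m, e, g, a)
  | sent :: rest =>
      if m.isSome && e.isSome && g.isSome && a.isSome then (m, e, g, a)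
      else
        let stripped := PySem.Str.strip sent
        if PySem.Str.len stripped ≤ 30 then bLoop rest m e g a
        else
          let low := PySem.Str.lower sent
          let m := if m.isNone && (PySem.Str.isIn "motivation" low || PySem.Str.isIn "why" low || PySem.Str.isIn "interest" low) then some stripped else m
          let e := if e.isNone && (PySem.Str.isIn "experience" low || PySem.Str.isIn "background" low || PySem.Str.isIn "history" low) then some stripped else e
          let g := if g.isNone && (PySem.Str.isIn "goals" low || PySem.Str.isIn "objectives" low || PySem.Str.isIn "future plans" low) then some stripped else g
          let a := if a.isNone && (PySem.Str.isIn "achievement" low || PySem.Str.isIn "accomplishment" low || PySem.Str.isIn "award" low) then some stripped else a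
          bLoop rest m e g a

def extract_application_data_py_alt (text : String) : List (String × String) :=
  let r := bLoop ((PySem.Str.split? text ".").getD []) none none none none
  (match r.1 with | some v => [("motivation", v)] | none => [])
  ++ (match r.2.1 with | some v => [("experience", v)] | none => [])
  ++ (match r.2.2.1 with | some v => [("goals", v)] | none => [])
  ++ (match r.2.2.2 with | some v => [("achievements", v)] | none => [])

-- ===== PRECONDITION & SPEC =====
def Spec_extract_application_data_py (text : String) (out : List (String × String)) : Prop := out = extract_application_data_py_alt text
instance (text : String) (out : List (String × String)) : Decidable (Spec_extract_application_data_py text out) := by unfold Spec_extract_application_data_py; infer_instance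

-- ===== CLAIM (what is proved, stated in full; the proofs are below) =====
def Claim_equal_extract_application_data_py : Prop := ∀ (text : String), Dom_extract_application_data_py text → Spec_extract_application_data_py text (extract_application_data_py text)

-- ===== LEMMAS AND PROOFS =====

-- B's loop fills each still-empty slot with aLoop's first match for that field's keywords.
set_option maxHeartbeats 1000000 in
theorem bLoop_eq (sents : List String) (m e g a : Option String) :
    bLoop sents m e g a =
      (m.or (aLoop sents ["motivation", "why", "interest"]),
       e.or (aLoop sents ["experience", "background", "history"]),
       g.or (aLoop sents ["goals", "objectives", "future plans"]),
       a.or (aLoop sents ["achievement", "accomplishment", "award"])) := by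
  induction sents generalizing m e g a with
  | nil => simp [bLoop, aLoop]
  | cons sent rest ih =>
      rw [bLoop]
      by_cases hlen : PySem.Str.len (PySem.Str.strip sent) ≤ 30
      case pos =>
        have h30 : (PySem.Chars.strip sent.toList).length ≤ 30 := by
          have := hlen; simp only [PySem.Str.len_eq, PySem.Str.toList_strip] at this; omega
        have hc : ∀ b : Bool, (b && decide (30 < PySem.Str.len (PySem.Str.strip sent))) = false := by
          intro b; simp [h30]
        rw [aLoop, aLoop, aLoop, aLoop]
        simp only [hc, Bool.false_eq_true, if_false]
        rcases m with _ | vm <;> rcases e with _ | ve <;> rcases g with _ | vg <;> rcases a with _ | va <;>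
          simp [ih, h30, Option.or]
      case neg =>
        have h30 : 30 < (PySem.Chars.strip sent.toList).length := by
          have := hlen; simp only [PySem.Str.len_eq, PySem.Str.toList_strip] at this; omega
        have hc : ∀ b : Bool, (b && decide (30 < PySem.Str.len (PySem.Str.strip sent))) = b := by
          intro b; simp [h30]
        rw [aLoop, aLoop, aLoop, aLoop]
        simp only [hc]
        rcases m with _ | vm <;> rcases e with _ | ve <;> rcases g with _ | vg <;> rcases a with _ | va <;>
          simp only [Option.isSome_none, Option.isSome_some, Option.isNone_none, Option.isNone_some,
            Bool.false_and, Bool.and_false, Bool.and_true, Bool.true_and, Bool.false_eq_true,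
            if_false, reduceIte, if_neg hlen, ih, List.any_cons, List.any_nil,
            Bool.or_false, Bool.or_assoc] <;>
          split_ifs <;> simp [Option.or]

theorem extract_application_data_py_eq_alt (text : String) :
    extract_application_data_py text = extract_application_data_py_alt text := by
  simp only [extract_application_data_py, extract_application_data_py_alt, aFields, bLoop_eq]
  cases hm : aLoop ((PySem.Str.split? text ".").getD []) ["motivation", "why", "interest"] <;>
    cases he : aLoop ((PySem.Str.split? text ".").getD []) ["experience", "background", "history"] <;>
      cases hg : aLoop ((PySem.Str.split? text ".").getD []) ["goals", "objectives", "future plans"] <;>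
        cases ha : aLoop ((PySem.Str.split? text ".").getD []) ["achievement", "accomplishment", "award"] <;>
          simp [hm, he, hg, ha, PySem.Dict.empty, PySem.Dict.items_insert, PySem.Dict.contains_insert, Option.or]

-- ===== VERDICT (by name: the statement is the Claim_ definition above) =====
theorem extract_application_data_py_spec : Claim_equal_extract_application_data_py := by
  intro text _
  exact extract_application_data_py_eq_alt text
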